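-- pv_equiv track=rewrite | github.com/zachswift615/workshop | workshop/src/jsonl_parser.py | _filter_from_uuid
-- ===== SOURCE A (Python) =====
-- from typing import Dict, List, Optional, Tuple
--
-- def _filter_from_uuid(messages: List[Dict], start_uuid: str) -> List[Dict]:
--     """Filter messages starting after a specific UUID"""
--     found = False
--     filtered = []
--
--     for msg in messages:
--         if found:
--             filtered.append(msg)
--         elif msg.get('uuid') == start_uuid:
--             found = True  # Start collecting from NEXT message
--
--     return filtered
-- ===== SOURCE B (Python) =====
-- from typing import Dict, List
--
-- def _filter_from_uuid(messages: List[Dict], start_uuid: str) -> List[Dict]: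
--     """Filter messages starting after a specific UUID (find-then-slice)."""
--     idx = next((i for i, msg in enumerate(messages) if msg.get('uuid') == start_uuid), None)
--     if idx is None:
--         return []
--     return messages[idx + 1:]
-- ===== Notes on version B (the rewrite author's own statement) =====
-- stated objective: simpler
-- what changed: Replaces the running boolean flag with per-element appends by locating the first matching index and returning the slice messages[idx+1:], returning [] when no message matches.
import Mathlib
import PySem

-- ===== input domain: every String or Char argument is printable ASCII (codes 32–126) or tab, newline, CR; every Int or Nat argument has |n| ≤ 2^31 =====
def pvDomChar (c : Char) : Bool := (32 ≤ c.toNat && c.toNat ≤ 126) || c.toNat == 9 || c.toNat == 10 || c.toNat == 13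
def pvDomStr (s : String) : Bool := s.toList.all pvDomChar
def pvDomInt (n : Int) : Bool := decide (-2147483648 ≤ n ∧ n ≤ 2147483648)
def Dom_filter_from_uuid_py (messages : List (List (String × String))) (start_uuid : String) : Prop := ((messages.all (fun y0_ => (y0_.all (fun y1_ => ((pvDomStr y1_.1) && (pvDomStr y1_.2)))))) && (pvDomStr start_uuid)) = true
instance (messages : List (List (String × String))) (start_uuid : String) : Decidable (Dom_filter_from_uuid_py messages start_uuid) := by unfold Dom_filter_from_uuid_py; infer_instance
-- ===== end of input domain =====

-- B replaces A's running boolean flag and per-element appends with find-first-index then drop (slice); objective: simpler.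

-- msg.get('uuid'): first-match lookup in the association list (exact for Python dict.get)
def pvGetUuid (msg : List (String × String)) : Option String :=
  PySem.Dict.get? (PySem.Dict.mk msg) "uuid"

-- ===== PORT A =====
-- the body of A's for-loop, as a named step function over the state (found, filtered)
def pvLoopA (start_uuid : String) (st : Bool × List (List (String × String)))
    (msg : List (String × String)) : Bool × List (List (String × String)) :=
  if st.1 then (st.1, st.2 ++ [msg])
  else if pvGetUuid msg == some start_uuid then (true, st.2)
  else st

def filter_from_uuid_py (messages : List (List (String × String))) (start_uuid : String) : List (List (String × String)) :=
  (messages.foldl (pvLoopA start_uuid) (false, [])).2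

-- ===== PORT B =====
-- find the index of the first matching message; slice messages[idx+1:]
def filter_from_uuid_py_alt (messages : List (List (String × String))) (start_uuid : String) : List (List (String × String)) :=
  match messages.findIdx? (fun msg => pvGetUuid msg == some start_uuid) with
  | none => []
  | some idx => messages.drop (idx + 1)

-- ===== PRECONDITION & SPEC =====
def Spec_filter_from_uuid_py (messages : List (List (String × String))) (start_uuid : String) (out : List (List (String × String))) : Prop := out = filter_from_uuid_py_alt messages start_uuid
instance (messages : List (List (String × String))) (start_uuid : String) (out : List (List (String × String))) : Decidable (Spec_filter_from_uuid_py messages start_uuid out) := by unfold Spec_filter_from_uuid_py; infer_instance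

-- ===== CLAIM (what is proved, stated in full; the proofs are below) =====
def Claim_equal_filter_from_uuid_py : Prop := ∀ (messages : List (List (String × String))) (start_uuid : String), Dom_filter_from_uuid_py messages start_uuid → Spec_filter_from_uuid_py messages start_uuid (filter_from_uuid_py messages start_uuid)

-- ===== LEMMAS AND PROOFS =====

-- once found = true, the loop appends every remaining message
theorem pv_loopA_true (u : String) (acc : List (List (String × String))) (m : List (String × String)) :
    pvLoopA u (true, acc) m = (true, acc ++ [m]) := rfl

theorem pv_foldl_true (u : String) (ms : List (List (String × String)))
    (acc : List (List (String × String))) :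
    ms.foldl (pvLoopA u) (true, acc) = (true, acc ++ ms) := by
  induction ms generalizing acc with
  | nil => simp
  | cons m ms ih => rw [List.foldl_cons, pv_loopA_true, ih]; simp

theorem pv_main (messages : List (List (String × String))) (start_uuid : String) :
    filter_from_uuid_py messages start_uuid = filter_from_uuid_py_alt messages start_uuid := by
  induction messages with
  | nil => rfl
  | cons m ms ih =>
    by_cases h : (pvGetUuid m == some start_uuid) = true
    · have hstep : pvLoopA start_uuid (false, []) m = (true, []) := by simp [pvLoopA, h]
      simp [filter_from_uuid_py, filter_from_uuid_py_alt, List.foldl_cons, hstep,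
        pv_foldl_true, List.findIdx?_cons, h]
    · have hstep : pvLoopA start_uuid (false, []) m = (false, []) := by
        simp [pvLoopA]
        intro hc
        simp [hc] at h
      have hL : filter_from_uuid_py (m :: ms) start_uuid = filter_from_uuid_py ms start_uuid := by
        simp [filter_from_uuid_py, List.foldl_cons, hstep]
      rw [hL, ih]
      unfold filter_from_uuid_py_alt
      rw [List.findIdx?_cons]
      rw [if_neg (by simpa using h)]
      cases ho : ms.findIdx? (fun msg => pvGetUuid msg == some start_uuid) with
      | none => simp
      | some i => simp [List.drop_succ_cons]

-- ===== VERDICT (by name: the statement is the Claim_ definition above) =====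
theorem filter_from_uuid_py_spec : Claim_equal_filter_from_uuid_py := by
  intro messages start_uuid _
  exact pv_main messages start_uuid
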